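-- pv_equiv track=rewrite | github.com/Gisdeveloper95/server-archivo | backend/services/dictionary_service.py | _deterministic_abbreviation
-- ===== SOURCE A (Python) =====
-- def _deterministic_abbreviation(word: str, max_length: int = 5) -> str:
--     """
--     Genera una abreviación determinística usando reglas:
--     - Consonantes + primera vocal
--     - Máximo 5 caracteres
--
--     Args:
--         word: Palabra a abreviar (ya normalizada)
--         max_length: Longitud máxima
--
--     Returns:
--         str: Abreviación
--     """
--     if len(word) <= 4:
--         return word
--
--     vowels = set('aeiou')
--     result = []
--     found_first_vowel = False
--
--     for char in word:
--         if char not in vowels: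
--             result.append(char)
--         elif not found_first_vowel:
--             result.append(char)
--             found_first_vowel = True
--
--         if len(result) >= max_length:
--             break
--
--     abbrev = ''.join(result)
--
--     # Si quedó muy corto, usar primeras letras
--     if len(abbrev) < 3:
--         abbrev = word[:max_length]
--
--     return abbrev[:max_length]
-- ===== SOURCE B (Python) =====
-- def _first_vowel_index(word):
--     for i, c in enumerate(word):
--         if c in 'aeiou':
--             return i
--     return None
--
--
-- def _deterministic_abbreviation(word: str, max_length: int = 5) -> str:
--     if len(word) <= 4:
--         return word
--     vowels = set('aeiou')
--     i = _first_vowel_index(word)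
--     if i is None:
--         core = word
--     else:
--         core = word[:i + 1] + ''.join(c for c in word[i + 1:] if c not in vowels)
--     abbrev = core[:max_length]
--     if len(abbrev) < 3:
--         abbrev = word[:max_length]
--     return abbrev[:max_length]
-- ===== Notes on version B (the rewrite author's own statement) =====
-- stated objective: alternative
-- what changed: Replaces A's stateful accumulator loop (found_first_vowel flag plus length-triggered break) by a precompute-then-build shape: find the first vowel's index, concatenate the prefix up to it with the vowel-stripped suffix, then slice; same cost, no mutable loop state.
-- outside the precondition, e.g. on _deterministic_abbreviation('abcdef', -1): A returns 'abcd', B returns 'abc'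
import Mathlib
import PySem

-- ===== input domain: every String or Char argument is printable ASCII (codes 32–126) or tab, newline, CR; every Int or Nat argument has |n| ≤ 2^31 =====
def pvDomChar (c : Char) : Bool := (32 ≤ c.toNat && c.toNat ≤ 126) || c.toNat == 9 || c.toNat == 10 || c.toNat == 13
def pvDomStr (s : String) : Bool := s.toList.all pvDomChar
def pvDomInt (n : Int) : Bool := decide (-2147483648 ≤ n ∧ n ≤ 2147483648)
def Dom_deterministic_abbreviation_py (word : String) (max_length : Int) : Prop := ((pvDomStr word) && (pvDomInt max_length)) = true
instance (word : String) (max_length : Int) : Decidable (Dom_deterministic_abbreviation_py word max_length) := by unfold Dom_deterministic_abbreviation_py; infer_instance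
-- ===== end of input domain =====

-- B rebuilds the abbreviation as (prefix through the first vowel) ++ (vowel-stripped rest)
-- instead of A's stateful flag-and-break loop; alternative decomposition, same cost.


-- vowels = set('aeiou'); membership test shared by both sources
def pvIsVowel (c : Char) : Bool := (['a', 'e', 'i', 'o', 'u'] : List Char).contains c

-- ===== PORT A =====
-- the for-loop with result accumulator, found_first_vowel flag and the len(result) >= max_length break
def pvALoop (m : Int) : List Char → List Char → Bool → List Char
  | [], res, _ => res
  | c :: rest, res, found =>
    if pvIsVowel c = false then
      if m ≤ ((res ++ [c]).length : Int) then res ++ [c] else pvALoop m rest (res ++ [c]) found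
    else if found = false then
      if m ≤ ((res ++ [c]).length : Int) then res ++ [c] else pvALoop m rest (res ++ [c]) true
    else
      if m ≤ ((res.length : Int)) then res else pvALoop m rest res found

def deterministic_abbreviation_py (word : String) (max_length : Int) : String :=
  if (PySem.Str.len word) ≤ 4 then word
  else
    let res := pvALoop max_length word.toList [] false
    let ab :=
      if ((res.length : Int)) < 3 then PySem.List.slice word.toList none (some max_length)
      else res
    String.ofList (PySem.List.slice ab none (some max_length))

-- ===== PORT B =====
-- helper _first_vowel_index: index of the first vowel, or none
def pvFirstVowelIdx : List Char → Nat → Option Nat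
  | [], _ => none
  | c :: cs, i => if pvIsVowel c then some i else pvFirstVowelIdx cs (i + 1)

def deterministic_abbreviation_py_alt (word : String) (max_length : Int) : String :=
  if (PySem.Str.len word) ≤ 4 then word
  else
    let cs := word.toList
    let core :=
      match pvFirstVowelIdx cs 0 with
      | none => cs
      | some i => cs.take (i + 1) ++ (cs.drop (i + 1)).filter (fun c => !(pvIsVowel c))
    let ab := PySem.List.slice core none (some max_length)
    let ab2 :=
      if ((ab.length : Int)) < 3 then PySem.List.slice cs none (some max_length)
      else ab
    String.ofList (PySem.List.slice ab2 none (some max_length))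

-- ===== PRECONDITION & SPEC =====
-- Pre_ excludes negative max_length (outside the natural domain of a length cap) for words longer
-- than 4 with at least two vowels, where A's break-then-double-negative-slice value is accidental;
-- on all other negative-max_length inputs A and B agree and those stay inside Pre_.
def Pre_deterministic_abbreviation_py (word : String) (max_length : Int) : Prop :=
  0 ≤ max_length ∨ PySem.Str.len word ≤ 4 ∨
    (word.toList.filter (fun c => pvIsVowel c)).length ≤ 1 ∨
    max_length ≤ -(PySem.Str.len word)
instance (word : String) (max_length : Int) : Decidable (Pre_deterministic_abbreviation_py word max_length) := by unfold Pre_deterministic_abbreviation_py; infer_instance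

def pvWitness_deterministic_abbreviation_py : String × Int := ("palabra", 5)

def Spec_deterministic_abbreviation_py (word : String) (max_length : Int) (out : String) : Prop := out = deterministic_abbreviation_py_alt word max_length
instance (word : String) (max_length : Int) (out : String) : Decidable (Spec_deterministic_abbreviation_py word max_length out) := by unfold Spec_deterministic_abbreviation_py; infer_instance

-- ===== CLAIM (what is proved, stated in full; the proofs are below) =====
def Claim_equal_deterministic_abbreviation_py : Prop := ∀ (word : String) (max_length : Int), Dom_deterministic_abbreviation_py word max_length → Pre_deterministic_abbreviation_py word max_length → Spec_deterministic_abbreviation_py word max_length (deterministic_abbreviation_py word max_length)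

-- ===== LEMMAS AND PROOFS =====

-- the characters A's loop keeps, ignoring the break: non-vowels plus the first vowel if the flag is off
def pvFilt : Bool → List Char → List Char
  | _, [] => []
  | found, c :: cs =>
    if pvIsVowel c = false then c :: pvFilt found cs
    else if found = false then c :: pvFilt true cs
    else pvFilt found cs

theorem pvALoop_eq (m : Int) : ∀ (cs res : List Char) (found : Bool),
    (res.length : Int) < m →
    pvALoop m cs res found = res ++ (pvFilt found cs).take (m.toNat - res.length) := by
  intro cs
  induction cs with
  | nil => intro res found _; simp [pvALoop, pvFilt]
  | cons c rest ih =>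
    intro res found h
    by_cases hv : pvIsVowel c = false
    · simp only [pvALoop, hv, if_true]
      by_cases hb : m ≤ ((res ++ [c]).length : Int)
      · rw [if_pos hb]
        have h1 : m.toNat - res.length = 1 := by simp at hb; omega
        simp [pvFilt, hv, h1]
      · rw [if_neg hb]
        have h2 : (((res ++ [c]).length : Int)) < m := lt_of_not_ge hb
        rw [ih (res ++ [c]) found h2]
        obtain ⟨k, hk⟩ : ∃ k, m.toNat - res.length = k + 1 := ⟨m.toNat - res.length - 1, by omega⟩
        have hk2 : m.toNat - (res ++ [c]).length = k := by simp; omega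
        simp [pvFilt, hv, hk, List.take_succ_cons]
        omega
    · simp only [Bool.not_eq_false] at hv
      by_cases hf : found = false
      · subst hf
        simp only [pvALoop, hv, Bool.true_eq_false, if_false, if_true]
        by_cases hb : m ≤ ((res ++ [c]).length : Int)
        · rw [if_pos hb]
          have h1 : m.toNat - res.length = 1 := by simp at hb; omega
          simp [pvFilt, hv, h1]
        · rw [if_neg hb]
          have h2 : (((res ++ [c]).length : Int)) < m := lt_of_not_ge hb
          rw [ih (res ++ [c]) true h2]
          obtain ⟨k, hk⟩ : ∃ k, m.toNat - res.length = k + 1 := ⟨m.toNat - res.length - 1, by omega⟩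
          have hk2 : m.toNat - (res ++ [c]).length = k := by simp; omega
          simp [pvFilt, hv, hk, List.take_succ_cons]
          omega
      · have hf' : found = true := by revert hf; cases found <;> simp
        subst hf'
        simp only [pvALoop, hv, Bool.true_eq_false, if_false]
        rw [if_neg (by exact not_le.mpr h)]
        rw [ih res true h]
        simp [pvFilt, hv]

theorem pvFilt_true (cs : List Char) : pvFilt true cs = cs.filter (fun c => !(pvIsVowel c)) := by
  induction cs with
  | nil => simp [pvFilt]
  | cons c rest ih =>
    by_cases hv : pvIsVowel c = false
    · simp [pvFilt, hv, ih, List.filter]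
    · simp only [Bool.not_eq_false] at hv
      simp [pvFilt, hv, ih, List.filter]

theorem pvFVI_none (cs : List Char) : ∀ j b, pvFirstVowelIdx cs j = none → pvFilt b cs = cs := by
  induction cs with
  | nil => intro j b _; simp [pvFilt]
  | cons c rest ih =>
    intro j b h
    simp only [pvFirstVowelIdx] at h
    by_cases hv : pvIsVowel c
    · simp [hv] at h
    · have hv' : pvIsVowel c = false := by revert hv; cases pvIsVowel c <;> simp
      rw [hv'] at h; simp at h
      simp [pvFilt, hv', ih (j + 1) b h]

theorem pvFVI_shift (cs : List Char) : ∀ j, pvFirstVowelIdx cs j = (pvFirstVowelIdx cs 0).map (· + j) := by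
  induction cs with
  | nil => intro j; simp [pvFirstVowelIdx]
  | cons c rest ih =>
    intro j
    by_cases hv : pvIsVowel c
    · simp [pvFirstVowelIdx, hv]
    · simp only [pvFirstVowelIdx, if_neg hv]
      rw [ih (j + 1), ih 1]
      cases pvFirstVowelIdx rest 0 <;> simp <;> omega

theorem pvFVI_some (cs : List Char) : ∀ i, pvFirstVowelIdx cs 0 = some i →
    pvFilt false cs = cs.take (i + 1) ++ (cs.drop (i + 1)).filter (fun c => !(pvIsVowel c)) := by
  induction cs with
  | nil => intro i h; simp [pvFirstVowelIdx] at h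
  | cons c rest ih =>
    intro i h
    simp only [pvFirstVowelIdx] at h
    by_cases hv : pvIsVowel c
    · rw [if_pos hv] at h
      have : i = 0 := by simpa using h.symm
      subst this
      simp [pvFilt, hv, pvFilt_true]
    · have hv' : pvIsVowel c = false := by revert hv; cases pvIsVowel c <;> simp
      rw [if_neg hv] at h
      rw [pvFVI_shift rest 1] at h
      cases hr : pvFirstVowelIdx rest 0 with
      | none => rw [hr] at h; simp at h
      | some k =>
        rw [hr] at h; simp at h
        have hik : i = k + 1 := by omega
        subst hik
        simp only [pvFilt, hv', if_true]
        rw [ih k hr]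
        simp [List.take_succ_cons]

theorem pvALoop_short (m : Int) (c : Char) (rest : List Char) (hm : m ≤ 0) :
    pvALoop m (c :: rest) [] false = [c] := by
  by_cases hv : pvIsVowel c = false <;>
    simp [pvALoop, hv, show m ≤ (1 : Int) from by omega]

theorem pvCore_eq : ∀ (cs : List Char),
    (cs.filter (fun c => pvIsVowel c)).length ≤ 1 →
    ∀ i, pvFirstVowelIdx cs 0 = some i →
    cs.take (i + 1) ++ (cs.drop (i + 1)).filter (fun c => !(pvIsVowel c)) = cs := by
  intro cs
  induction cs with
  | nil => intro _ i h; simp [pvFirstVowelIdx] at h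
  | cons c rest ih =>
    intro h1 i h
    simp only [pvFirstVowelIdx] at h
    by_cases hv : pvIsVowel c
    · rw [if_pos hv] at h
      have hi : i = 0 := by simpa using h.symm
      subst hi
      have hrest : rest.filter pvIsVowel = [] := by
        rw [List.filter_cons_of_pos hv] at h1
        simp only [List.length_cons] at h1
        exact List.eq_nil_of_length_eq_zero (by omega)
      have : (rest.filter fun c => !(pvIsVowel c)) = rest := by
        rw [List.filter_eq_self]
        intro a ha
        have := List.filter_eq_nil_iff.mp hrest a ha
        simpa using this
      simp [this]
    · rw [if_neg hv] at h
      rw [pvFVI_shift rest 1] at h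
      cases hr : pvFirstVowelIdx rest 0 with
      | none => rw [hr] at h; simp at h
      | some k =>
        rw [hr] at h; simp at h
        have hik : i = k + 1 := by omega
        subst hik
        have h1' : (rest.filter (fun c => pvIsVowel c)).length ≤ 1 := by
          rw [List.filter_cons_of_neg (by simpa using hv)] at h1
          exact h1
        have := ih h1' k hr
        simpa [List.take_succ_cons] using congrArg (fun l => c :: l) this

theorem pvNegMain (word : String) (m : Int) (hm : m < 0)
    (hc : ¬ PySem.Str.len word ≤ 4)
    (h1 : (word.toList.filter (fun c => pvIsVowel c)).length ≤ 1) :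
    deterministic_abbreviation_py word m = deterministic_abbreviation_py_alt word m := by
  have hlen' : 4 < (word.toList.length : Int) := by simpa using lt_of_not_ge hc
  obtain ⟨c, rest, hcs⟩ : ∃ c rest, word.toList = c :: rest := by
    cases h : word.toList with
    | nil => rw [h] at hlen'; simp at hlen'
    | cons c rest => exact ⟨c, rest, rfl⟩
  unfold deterministic_abbreviation_py deterministic_abbreviation_py_alt
  rw [if_neg hc, if_neg hc]
  have hA : pvALoop m word.toList [] false = [c] := by
    rw [hcs]; exact pvALoop_short m c rest (by omega)
  rw [hA]
  cases hfvi : pvFirstVowelIdx word.toList 0 with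
  | none => simp [hfvi]
  | some i => simp [hfvi, pvCore_eq word.toList h1 i hfvi]

theorem pvVeryNeg (word : String) (m : Int)
    (hm : m ≤ -(PySem.Str.len word))
    (hc : ¬ PySem.Str.len word ≤ 4) :
    deterministic_abbreviation_py word m = deterministic_abbreviation_py_alt word m := by
  have hlen' : 4 < (word.toList.length : Int) := by simpa using lt_of_not_ge hc
  have hmlen : m ≤ -(word.toList.length : Int) := by simpa using hm
  obtain ⟨c, rest, hcs⟩ : ∃ c rest, word.toList = c :: rest := by
    cases h : word.toList with
    | nil => rw [h] at hlen'; simp at hlen'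
    | cons c rest => exact ⟨c, rest, rfl⟩
  have hmk : m = -(((-m).toNat : Nat) : Int) := by omega
  have hslice : ∀ xs : List Char, xs.length ≤ word.toList.length →
      PySem.List.slice xs none (some m) = [] := by
    intro xs hxs
    rw [hmk, PySem.List.slice_to_neg_natCast (xs := xs) (k := (-m).toNat) (by omega)]
    have h0 : xs.length - (-m).toNat = 0 := by omega
    simp [h0]
  unfold deterministic_abbreviation_py deterministic_abbreviation_py_alt
  rw [if_neg hc, if_neg hc]
  have hA : pvALoop m word.toList [] false = [c] := by
    rw [hcs]; exact pvALoop_short m c rest (by omega)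
  rw [hA]
  cases hfvi : pvFirstVowelIdx word.toList 0 with
  | none =>
    simp only [hfvi]
    rw [hslice word.toList le_rfl]
    simp [hslice [] (by simp)]
  | some i =>
    have hcorelen :
        (word.toList.take (i + 1) ++
          (word.toList.drop (i + 1)).filter (fun c => !(pvIsVowel c))).length ≤
        word.toList.length := by
      have h1 := List.length_filter_le (fun c => !(pvIsVowel c)) (word.toList.drop (i + 1))
      simp only [List.length_append, List.length_take, List.length_drop] at *
      omega
    simp only [hfvi]
    rw [hslice _ hcorelen, hslice word.toList le_rfl]
    simp [hslice [] (by simp)]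

theorem pvMain : ∀ (word : String) (m : Int), 0 ≤ m →
    deterministic_abbreviation_py word m = deterministic_abbreviation_py_alt word m := by
  intro word m hm
  unfold deterministic_abbreviation_py deterministic_abbreviation_py_alt
  split_ifs with hc
  · rfl
  · have hlen' : 4 < (word.toList.length : Int) := by
      simpa using lt_of_not_ge hc
    rcases eq_or_lt_of_le hm with hm0 | hm1
    · -- max_length = 0: both sides collapse to "" via the fallback word[:0] and the final [:0]
      obtain ⟨c, rest, hcs⟩ : ∃ c rest, word.toList = c :: rest := by
        cases h : word.toList with
        | nil => rw [h] at hlen'; simp at hlen'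
        | cons c rest => exact ⟨c, rest, rfl⟩
      have hA : pvALoop m (c :: rest) [] false = [c] := pvALoop_short m c rest (by omega)
      rw [hcs, hA, ← hm0]
      simp [PySem.List.slice_to _ (le_refl (0 : Int))]
    · -- max_length ≥ 1: the loop collects exactly the first max_length filtered characters
      rw [pvALoop_eq m word.toList [] false (by simpa using hm1)]
      cases hfvi : pvFirstVowelIdx word.toList 0 with
      | none =>
        simp [hfvi, pvFVI_none word.toList 0 false hfvi, PySem.List.slice_to _ hm]
      | some i =>
        simp [hfvi, pvFVI_some word.toList i hfvi, PySem.List.slice_to _ hm]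

-- ===== VERDICT (by name: the statement is the Claim_ definition above) =====
theorem deterministic_abbreviation_py_spec : Claim_equal_deterministic_abbreviation_py := by
  intro word m _ hpre
  unfold Spec_deterministic_abbreviation_py
  by_cases hm : 0 ≤ m
  · exact pvMain word m hm
  · rcases hpre with h | h | h | h
    · exact absurd h hm
    · unfold deterministic_abbreviation_py deterministic_abbreviation_py_alt
      rw [if_pos h, if_pos h]
    · by_cases hc : PySem.Str.len word ≤ 4
      · unfold deterministic_abbreviation_py deterministic_abbreviation_py_alt
        rw [if_pos hc, if_pos hc]
      · exact pvNegMain word m (lt_of_not_ge hm) hc h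
    · by_cases hc : PySem.Str.len word ≤ 4
      · unfold deterministic_abbreviation_py deterministic_abbreviation_py_alt
        rw [if_pos hc, if_pos hc]
      · exact pvVeryNeg word m h hc
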